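-- pv_equiv track=rewrite | github.com/bledidalipaj/codefights | challenges/python/stairsgain.py | StairsGain
-- ===== SOURCE A (Python) =====
-- def StairsGain(stairs):
--     # No matter were you are standing, you should
--     # always pass the next step
--     max_score = 0
--     double = False
--     for i in range(len(stairs)):
--         if double:
--             if stairs[i] == 'y':
--                 max_score += 2
--             else:
--                 max_score -= 1
--         else:
--             if stairs[i] == 'y':
--                 max_score += 1
--             else:
--                 max_score -= 2
--         double = not double
--     return max_score
-- ===== SOURCE B (Python) =====
-- def StairsGain(stairs):
--     even = stairs[::2]
--     odd = stairs[1::2]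
--     ye = even.count('y')
--     yo = odd.count('y')
--     return ye - 2 * (len(even) - ye) + 2 * yo - (len(odd) - yo)
-- ===== Notes on version B (the rewrite author's own statement) =====
-- stated objective: simpler
-- what changed: Replaced the stateful loop with its alternating 'double' flag by two parity slices (stairs[::2], stairs[1::2]) whose 'y' counts give the answer in one closed-form arithmetic expression.
import Mathlib
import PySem

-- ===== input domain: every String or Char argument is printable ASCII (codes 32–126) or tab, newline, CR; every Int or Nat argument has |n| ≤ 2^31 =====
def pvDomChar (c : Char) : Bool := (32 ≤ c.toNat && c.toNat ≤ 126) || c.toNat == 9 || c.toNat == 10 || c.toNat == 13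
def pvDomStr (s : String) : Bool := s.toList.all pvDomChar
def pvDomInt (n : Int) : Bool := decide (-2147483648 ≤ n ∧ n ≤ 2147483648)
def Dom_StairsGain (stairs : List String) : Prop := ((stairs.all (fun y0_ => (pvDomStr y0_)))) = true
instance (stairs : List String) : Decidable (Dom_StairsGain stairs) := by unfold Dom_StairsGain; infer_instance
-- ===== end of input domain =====

-- B replaces A's stateful alternating-flag loop by parity slices whose 'y' counts give a closed-form sum (objective: simpler).


-- ===== PORT A =====
def StairsGain (stairs : List String) : Int :=
  let r := (PySem.List.pyRange 0 (PySem.List.len stairs) 1).foldl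
      (fun (acc : Int × Bool) i =>
        let s := PySem.List.pyGetD stairs i ""
        if acc.2 then
          (if s = "y" then acc.1 + 2 else acc.1 - 1, !acc.2)
        else
          (if s = "y" then acc.1 + 1 else acc.1 - 2, !acc.2)) ((0 : Int), false)
  r.1

-- ===== PORT B =====
def StairsGain_alt (stairs : List String) : Int :=
  let even := (PySem.List.slice? stairs none none 2).getD []
  let odd := (PySem.List.slice? stairs (some 1) none 2).getD []
  let ye : Int := PySem.List.count even "y"
  let yo : Int := PySem.List.count odd "y"
  ye - 2 * (PySem.List.len even - ye) + 2 * yo - (PySem.List.len odd - yo)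

-- ===== PRECONDITION & SPEC =====
def Spec_StairsGain (stairs : List String) (out : Int) : Prop := out = StairsGain_alt stairs
instance (stairs : List String) (out : Int) : Decidable (Spec_StairsGain stairs out) := by unfold Spec_StairsGain; infer_instance

-- ===== CLAIM (what is proved, stated in full; the proofs are below) =====
def Claim_equal_StairsGain : Prop := ∀ (stairs : List String), Dom_StairsGain stairs → Spec_StairsGain stairs (StairsGain stairs)

-- ===== LEMMAS AND PROOFS =====

-- even-index elements of a list (indices 0, 2, 4, …)
def pvEvens {α : Type} : List α → List α
  | [] => []
  | [a] => [a]
  | a :: _ :: t => a :: pvEvens t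

theorem pvEvens_cons {α : Type} (a : α) (t : List α) :
    pvEvens (a :: t) = a :: pvEvens t.tail := by
  cases t <;> rfl

-- reindexing step for the step-2 filterMap extracted from slice?
theorem pv_fm2 {α : Type} (t : List α) (a b : α) (c : Nat) :
    (List.range (c + 1)).filterMap (fun (k : Nat) => (a :: b :: t)[(2 * (k : Int)).toNat]?)
      = a :: (List.range c).filterMap (fun (k : Nat) => t[(2 * (k : Int)).toNat]?) := by
  rw [List.range_succ_eq_map, List.filterMap_cons, List.filterMap_map]
  simp only [Nat.cast_zero, mul_zero, Int.toNat_zero, List.getElem?_cons_zero]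
  refine congrArg (List.cons a) (List.filterMap_congr ?_)
  intro k _
  have h : (2 * ((k : Int) + 1)).toNat = (2 * (k : Int)).toNat + 2 := by
    omega
  simp [Function.comp, h]

theorem pv_fm_closed {α : Type} :
    ∀ (xs : List α),
      (List.range ((xs.length + 1) / 2)).filterMap (fun (k : Nat) => xs[(2 * (k : Int)).toNat]?)
        = pvEvens xs
  | [] => by simp [pvEvens]
  | [a] => by simp [pvEvens, List.range_succ]
  | a :: b :: t => by
      have hc : ((a :: b :: t).length + 1) / 2 = (t.length + 1) / 2 + 1 := by
        simp [List.length_cons]; omega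
      rw [hc, pv_fm2, pv_fm_closed t, pvEvens]

theorem pv_slice_even {α : Type} (xs : List α) :
    PySem.List.slice? xs none none 2 = some (pvEvens xs) := by
  have h2 : (2 : Int) ≠ 0 := by decide
  simp only [PySem.List.slice?, PySem.List.sliceIndices, if_neg h2]
  norm_num
  have hc : (if 0 < xs.length then (((xs.length : Int) + 2 - 1) / 2).toNat else 0)
      = (xs.length + 1) / 2 := by
    split_ifs with h <;> omega
  rw [hc]
  exact pv_fm_closed xs

theorem pv_slice_odd {α : Type} (xs : List α) :
    PySem.List.slice? xs (some 1) none 2 = some (pvEvens xs.tail) := by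
  have h2 : (2 : Int) ≠ 0 := by decide
  cases xs with
  | nil => rfl
  | cons a t =>
    simp only [PySem.List.slice?, PySem.List.sliceIndices, if_neg h2]
    norm_num
    have hc : (if 0 < t.length then (((t.length : Int) + 2 - 1) / 2).toNat else 0)
        = (t.length + 1) / 2 := by
      split_ifs with h <;> omega
    rw [hc]
    have hidx : (fun (k : Nat) => (a :: t)[((1 : Int) + 2 * (k : Int)).toNat]?)
        = fun (k : Nat) => t[(2 * (k : Int)).toNat]? := by
      funext k
      have hk : ((1 : Int) + 2 * (k : Int)).toNat = (2 * (k : Int)).toNat + 1 := by omega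
      simp [hk]
    rw [hidx]
    exact pv_fm_closed t

-- per-element contributions of A's two branches
def pvC1 (s : String) : Int := if s = "y" then 1 else -2
def pvC2 (s : String) : Int := if s = "y" then 2 else -1

theorem pvAlt_nil : StairsGain_alt [] = 0 := by
  simp [StairsGain_alt, pv_slice_even, pv_slice_odd, pvEvens,
    PySem.List.count, PySem.List.len]

theorem pvAlt_single (a : String) : StairsGain_alt [a] = pvC1 a := by
  simp only [StairsGain_alt, pv_slice_even, pv_slice_odd, Option.getD_some]
  simp only [show ([a] : List String).tail = [] from rfl, pvEvens,
    PySem.List.count, PySem.List.len, pvC1]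
  by_cases h : a = "y" <;> simp [h]

theorem pvAlt_cons2 (a b : String) (t : List String) :
    StairsGain_alt (a :: b :: t) = pvC1 a + pvC2 b + StairsGain_alt t := by
  simp only [StairsGain_alt, pv_slice_even, pv_slice_odd, Option.getD_some]
  have he : pvEvens (a :: b :: t) = a :: pvEvens t := rfl
  have ho : (a :: b :: t).tail = b :: t := rfl
  rw [he, ho, pvEvens_cons b t]
  simp only [PySem.List.count, PySem.List.len, List.count_cons, List.length_cons, pvC1, pvC2]
  by_cases ha : a = "y" <;> by_cases hb : b = "y" <;> simp [ha, hb] <;> push_cast <;> ring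

-- A's loop is a fold over the list itself
theorem pvA_fold (stairs : List String) :
    StairsGain stairs = (stairs.foldl
      (fun (acc : Int × Bool) s =>
        if acc.2 then
          (if s = "y" then acc.1 + 2 else acc.1 - 1, !acc.2)
        else
          (if s = "y" then acc.1 + 1 else acc.1 - 2, !acc.2)) ((0 : Int), false)).1 := by
  simp only [StairsGain, PySem.List.len]
  rw [PySem.List.foldl_pyRange_zero_pyGetD' stairs ""
    (fun (acc : Int × Bool) s =>
        if acc.2 then
          (if s = "y" then acc.1 + 2 else acc.1 - 1, !acc.2)
        else
          (if s = "y" then acc.1 + 1 else acc.1 - 2, !acc.2)) ((0 : Int), false)]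

theorem pv_main :
    ∀ (xs : List String) (m : Int),
      (xs.foldl
        (fun (acc : Int × Bool) s =>
          if acc.2 then
            (if s = "y" then acc.1 + 2 else acc.1 - 1, !acc.2)
          else
            (if s = "y" then acc.1 + 1 else acc.1 - 2, !acc.2)) (m, false)).1
        = m + StairsGain_alt xs
  | [], m => by simp [pvAlt_nil]
  | [a], m => by
      simp only [List.foldl_cons, List.foldl_nil, pvAlt_single, pvC1]
      by_cases h : a = "y" <;> simp [h] <;> ring
  | a :: b :: t, m => by
      have step : ((a :: b :: t).foldl
          (fun (acc : Int × Bool) s =>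
            if acc.2 then
              (if s = "y" then acc.1 + 2 else acc.1 - 1, !acc.2)
            else
              (if s = "y" then acc.1 + 1 else acc.1 - 2, !acc.2)) (m, false))
          = (t.foldl
            (fun (acc : Int × Bool) s =>
              if acc.2 then
                (if s = "y" then acc.1 + 2 else acc.1 - 1, !acc.2)
              else
                (if s = "y" then acc.1 + 1 else acc.1 - 2, !acc.2))
            (m + pvC1 a + pvC2 b, false)) := by
        simp only [List.foldl_cons, pvC1, pvC2]
        by_cases ha : a = "y" <;> by_cases hb : b = "y" <;> simp [ha, hb] <;> ring_nf
      rw [step, pv_main t (m + pvC1 a + pvC2 b), pvAlt_cons2]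
      ring

-- ===== VERDICT (by name: the statement is the Claim_ definition above) =====
theorem StairsGain_spec : Claim_equal_StairsGain := by
  intro stairs _
  show StairsGain stairs = StairsGain_alt stairs
  rw [pvA_fold, pv_main stairs 0, zero_add]
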